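-- pv_equiv track=rewrite | github.com/linusmoreau/AoC | 2020/day20.py | expand_down
-- ===== SOURCE A (Python) =====
-- def expand_left(n, dat, data):
--     r = [n]
--     try:
--         return r + expand_left(dat['lef'], data[dat['lef']], data)
--     except KeyError:
--         return r
--
-- def expand_right(n, dat, data):
--     r = [n]
--     try:
--         return r + expand_right(dat['rig'], data[dat['rig']], data)
--     except KeyError:
--         return r
--
-- def expand_down(n, dat, data):
--     try:
--         r = [[n] + expand_right(dat['rig'], data[dat['rig']], data)]
--     except KeyError:
--         r = [[n] + expand_left(dat['lef'], data[dat['lef']], data)]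
--     try:
--         r.extend(expand_down(dat['bot'], data[dat['bot']], data))
--         return r
--     except KeyError:
--         return r
-- ===== SOURCE B (Python) =====
-- def expand_down(n, dat, data):
--     # Iterative grid assembly: outer loop follows 'bot' links, inner loop builds
--     # each row by following the chosen horizontal link ('rig', else 'lef').
--     rows = []
--     while True:
--         if 'rig' in dat and dat['rig'] in data:
--             name = 'rig'
--         elif 'lef' in dat and dat['lef'] in data:
--             name = 'lef'
--         else:
--             if not rows:
--                 raise KeyError('horizontal link')
--             break
--         row = [n]
--         k = dat[name]
--         while True:
--             row.append(k)
--             d = data[k]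
--             if name in d and d[name] in data:
--                 k = d[name]
--             else:
--                 break
--         rows.append(row)
--         if 'bot' in dat and dat['bot'] in data:
--             n = dat['bot']
--             dat = data[n]
--         else:
--             break
--     return rows
-- ===== Notes on version B (the rewrite author's own statement) =====
-- stated objective: simpler
-- what changed: A builds the grid with mutually recursive functions driven by try/except KeyError control flow; B is a plain two-level iteration: an outer loop that follows 'bot' links accumulating rows and an inner loop that builds each row by following the chosen 'rig'/'lef' link, with explicit membership tests instead of exceptions.
import Mathlib
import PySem

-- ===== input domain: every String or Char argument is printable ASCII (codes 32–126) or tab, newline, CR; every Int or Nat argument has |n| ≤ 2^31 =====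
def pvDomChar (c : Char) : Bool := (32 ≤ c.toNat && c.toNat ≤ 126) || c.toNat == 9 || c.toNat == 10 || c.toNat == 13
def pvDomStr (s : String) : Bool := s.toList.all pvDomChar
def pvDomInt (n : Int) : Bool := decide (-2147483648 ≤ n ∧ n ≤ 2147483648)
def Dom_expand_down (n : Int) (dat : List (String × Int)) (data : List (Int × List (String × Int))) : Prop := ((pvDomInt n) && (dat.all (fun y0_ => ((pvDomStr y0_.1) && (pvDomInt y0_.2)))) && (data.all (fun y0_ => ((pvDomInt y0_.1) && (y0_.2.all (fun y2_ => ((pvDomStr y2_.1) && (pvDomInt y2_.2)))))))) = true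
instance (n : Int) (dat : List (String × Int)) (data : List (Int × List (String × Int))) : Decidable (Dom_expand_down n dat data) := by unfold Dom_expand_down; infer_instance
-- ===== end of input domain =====

-- B replaces A's exception-driven recursion by an explicit two-level iteration (outer loop follows
-- 'bot' links with an accumulator of rows, inner loop follows the chosen 'rig'/'lef' link): simpler.


-- dict lookups (Python dict → assoc list; lookup = first match, exact via PySem.Dict)
def getS (d : List (String × Int)) (k : String) : Option Int :=
  (PySem.Dict.mk d).get? k

def getT (data : List (Int × List (String × Int))) (k : Int) : Option (List (String × Int)) :=
  (PySem.Dict.mk data).get? k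

-- ===== PORT A =====
-- expand_right: r = [n]; recurse on dat['rig'] / data[dat['rig']], KeyError (= none) stops.
-- The fuel only makes the recursion total; under Pre_ (acyclic link graphs) it is never exhausted.
def expandRightA (fuel : Nat) (n : Int) (dat : List (String × Int)) (data : List (Int × List (String × Int))) : List Int :=
  match fuel with
  | 0 => [n]
  | f + 1 =>
    match getS dat "rig" with
    | some v =>
      match getT data v with
      | some d => n :: expandRightA f v d data
      | none => [n]
    | none => [n]

def expandLeftA (fuel : Nat) (n : Int) (dat : List (String × Int)) (data : List (Int × List (String × Int))) : List Int :=
  match fuel with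
  | 0 => [n]
  | f + 1 =>
    match getS dat "lef" with
    | some v =>
      match getT data v with
      | some d => n :: expandLeftA f v d data
      | none => [n]
    | none => [n]

-- the 'except KeyError' fallback of the first try: row via expand_left, none = KeyError propagates
def rowALef (fuel : Nat) (n : Int) (dat : List (String × Int)) (data : List (Int × List (String × Int))) : Option (List Int) :=
  match getS dat "lef" with
  | some v =>
    match getT data v with
    | some d => some (n :: expandLeftA fuel v d data)
    | none => none
  | none => none

-- first try: r = [[n] + expand_right(...)], KeyError → lef branch
def rowA (fuel : Nat) (n : Int) (dat : List (String × Int)) (data : List (Int × List (String × Int))) : Option (List Int) :=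
  match getS dat "rig" with
  | some v =>
    match getT data v with
    | some d => some (n :: expandRightA fuel v d data)
    | none => rowALef fuel n dat data
  | none => rowALef fuel n dat data

-- expand_down: none = KeyError; a KeyError of the recursive call is caught (→ some [row])
def expandDownCoreA (fuel : Nat) (n : Int) (dat : List (String × Int)) (data : List (Int × List (String × Int))) : Option (List (List Int)) :=
  match fuel with
  | 0 => some []
  | f + 1 =>
    match rowA (data.length + 1) n dat data with
    | none => none
    | some row =>
      match getS dat "bot" with
      | some v =>
        match getT data v with
        | some d =>
          match expandDownCoreA f v d data with
          | some rest => some (row :: rest)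
          | none => some [row]
        | none => some [row]
      | none => some [row]

def expand_down (n : Int) (dat : List (String × Int)) (data : List (Int × List (String × Int))) : List (List Int) :=
  (expandDownCoreA (data.length + 1) n dat data).getD []

-- ===== PORT B =====
-- B (Source B): pick the horizontal link name ('rig', else 'lef'); none = no usable link
def pickLefB (dat : List (String × Int)) (data : List (Int × List (String × Int))) : Option (String × Int) :=
  match getS dat "lef" with
  | some v => if (getT data v).isSome then some ("lef", v) else none
  | none => none

def pickLinkB (dat : List (String × Int)) (data : List (Int × List (String × Int))) : Option (String × Int) :=
  match getS dat "rig" with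
  | some v => if (getT data v).isSome then some ("rig", v) else pickLefB dat data
  | none => pickLefB dat data

-- inner while-loop: row.append(k); d = data[k]; advance k while the link is usable (acc = reversed row)
def rowLoopB (fuel : Nat) (name : String) (k : Int) (data : List (Int × List (String × Int))) (acc : List Int) : List Int :=
  match fuel with
  | 0 => (k :: acc).reverse
  | f + 1 =>
    match getT data k with
    | none => (k :: acc).reverse
    | some d =>
      match getS d name with
      | some v => if (getT data v).isSome then rowLoopB f name v data (k :: acc) else (k :: acc).reverse
      | none => (k :: acc).reverse

-- outer while-loop over 'bot' links, rows accumulated in reverse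
def downLoopB (fuel : Nat) (n : Int) (dat : List (String × Int)) (data : List (Int × List (String × Int))) (rows : List (List Int)) : List (List Int) :=
  match fuel with
  | 0 => rows.reverse
  | f + 1 =>
    match pickLinkB dat data with
    | none => rows.reverse
    | some (name, k) =>
      let rows' := rowLoopB (data.length + 1) name k data [n] :: rows
      match getS dat "bot" with
      | some v =>
        match getT data v with
        | some d => downLoopB f v d data rows'
        | none => rows'.reverse
      | none => rows'.reverse

def expand_down_alt (n : Int) (dat : List (String × Int)) (data : List (Int × List (String × Int))) : List (List Int) :=
  downLoopB (data.length + 1) n dat data []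

-- ===== PRECONDITION & SPEC =====
-- first index of data whose key is v (dict lookup finds the same entry)
def keyIdx? (data : List (Int × List (String × Int))) (v : Int) : Option Nat :=
  data.findIdx? (fun p => p.1 == v)

-- the node d has a 'name' link whose target is a key of data
def usableLink (d : List (String × Int)) (data : List (Int × List (String × Int))) (name : String) : Bool :=
  match getS d name with
  | some v => (getT data v).isSome
  | none => false

-- one step along the 'name' links: entry index ↦ index of its link target
def linkStep (data : List (Int × List (String × Int))) (name : String) : Option Nat → Option Nat
  | none => none
  | some i =>
    match data[i]? with
    | some (_, d) =>
      match getS d name with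
      | some v => keyIdx? data v
      | none => none
    | none => none

-- the 'name' chain starting at o leaves data (no cycle is reached)
def chainEndsB (data : List (Int × List (String × Int))) (name : String) (o : Option Nat) : Bool :=
  ((linkStep data name)^[data.length + 1] o).isNone

-- the horizontal row chain of node d ('rig' if usable, else 'lef') terminates
def rowEndsB (data : List (Int × List (String × Int))) (d : List (String × Int)) : Bool :=
  if usableLink d data "rig" then chainEndsB data "rig" ((getS d "rig").bind (keyIdx? data))
  else if usableLink d data "lef" then chainEndsB data "lef" ((getS d "lef").bind (keyIdx? data))
  else true

-- one step of the downward walk: follow 'bot' only from a node that still has a usable row link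
def botStep (data : List (Int × List (String × Int))) : Option Nat → Option Nat
  | none => none
  | some i =>
    match data[i]? with
    | some (_, d) =>
      if usableLink d data "rig" || usableLink d data "lef" then
        match getS d "bot" with
        | some v => keyIdx? data v
        | none => none
      else none
    | none => none

def botStart (dat : List (String × Int)) (data : List (Int × List (String × Int))) : Option Nat :=
  (getS dat "bot").bind (keyIdx? data)

-- the downward walk terminates and every visited node's row chain terminates
def botWalkOk (dat : List (String × Int)) (data : List (Int × List (String × Int))) : Bool :=
  ((botStep data)^[data.length + 1] (botStart dat data)).isNone
  && (List.range (data.length + 1)).all (fun m =>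
      match (botStep data)^[m] (botStart dat data) with
      | some i =>
        match data[i]? with
        | some (_, d) => rowEndsB data d
        | none => true
      | none => true)

-- Pre_ is exactly where Python A returns: the start node has a usable 'rig' or 'lef' link (otherwise
-- A raises KeyError) and the walk over the link graph terminates (otherwise A recurses forever).
def Pre_expand_down (n : Int) (dat : List (String × Int)) (data : List (Int × List (String × Int))) : Prop :=
  (usableLink dat data "rig" || usableLink dat data "lef") = true
  ∧ rowEndsB data dat = true
  ∧ botWalkOk dat data = true

instance (n : Int) (dat : List (String × Int)) (data : List (Int × List (String × Int))) : Decidable (Pre_expand_down n dat data) := by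
  unfold Pre_expand_down; infer_instance

def pvWitness_expand_down : Int × (List (String × Int)) × (List (Int × List (String × Int))) :=
  (0, [("rig", 1)], [(1, [])])

def Spec_expand_down (n : Int) (dat : List (String × Int)) (data : List (Int × List (String × Int))) (out : List (List Int)) : Prop := out = expand_down_alt n dat data
instance (n : Int) (dat : List (String × Int)) (data : List (Int × List (String × Int))) (out : List (List Int)) : Decidable (Spec_expand_down n dat data out) := by unfold Spec_expand_down; infer_instance

-- ===== CLAIM (what is proved, stated in full; the proofs are below) =====
def Claim_equal_expand_down : Prop := ∀ (n : Int) (dat : List (String × Int)) (data : List (Int × List (String × Int))), Dom_expand_down n dat data → Pre_expand_down n dat data → Spec_expand_down n dat data (expand_down n dat data)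

-- ===== LEMMAS AND PROOFS =====

theorem rowLoopB_eq_right (fuel : Nat) : ∀ (v : Int) (d : List (String × Int)) (data : List (Int × List (String × Int))) (acc : List Int), getT data v = some d →
    rowLoopB fuel "rig" v data acc = acc.reverse ++ expandRightA fuel v d data := by
  induction fuel with
  | zero => intro v d data acc h; simp [rowLoopB, expandRightA]
  | succ f ih =>
    intro v d data acc h
    rw [rowLoopB, expandRightA, h]
    cases hg : getS d "rig" with
    | none => simp [hg]
    | some w =>
      cases hw : getT data w with
      | none => simp [hg, hw]
      | some d2 => simp only [hg, hw, Option.isSome_some, if_true]; rw [ih w d2 data (v :: acc) hw]; simp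

theorem rowLoopB_eq_left (fuel : Nat) : ∀ (v : Int) (d : List (String × Int)) (data : List (Int × List (String × Int))) (acc : List Int), getT data v = some d →
    rowLoopB fuel "lef" v data acc = acc.reverse ++ expandLeftA fuel v d data := by
  induction fuel with
  | zero => intro v d data acc h; simp [rowLoopB, expandLeftA]
  | succ f ih =>
    intro v d data acc h
    rw [rowLoopB, expandLeftA, h]
    cases hg : getS d "lef" with
    | none => simp [hg]
    | some w =>
      cases hw : getT data w with
      | none => simp [hg, hw]
      | some d2 => simp only [hg, hw, Option.isSome_some, if_true]; rw [ih w d2 data (v :: acc) hw]; simp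

theorem downLoopB_eq (fuel : Nat) : ∀ (n : Int) (dat : List (String × Int)) (data : List (Int × List (String × Int))) (rows : List (List Int)),
    downLoopB fuel n dat data rows = rows.reverse ++ (expandDownCoreA fuel n dat data).getD [] := by
  induction fuel with
  | zero => intro n dat data rows; simp [downLoopB, expandDownCoreA]
  | succ f ih =>
    intro n dat data rows
    rw [downLoopB, expandDownCoreA]
    have hbot : ∀ (row : List Int),
        (match getS dat "bot" with
          | some v =>
            match getT data v with
            | some d => downLoopB f v d data (row :: rows)
            | none => (row :: rows).reverse
          | none => (row :: rows).reverse)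
        = rows.reverse ++
          (match getS dat "bot" with
            | some v =>
              match getT data v with
              | some d =>
                match expandDownCoreA f v d data with
                | some rest => some (row :: rest)
                | none => some [row]
              | none => some [row]
            | none => some [row] : Option (List (List Int))).getD [] := by
      intro row
      cases hb : getS dat "bot" with
      | none => simp
      | some w =>
        cases hw : getT data w with
        | none => simp [hw]
        | some d2 =>
          simp only [hw]
          rw [ih w d2 data (row :: rows)]
          cases expandDownCoreA f w d2 data <;> simp
    cases hr : getS dat "rig" with
    | some v =>
      cases hv : getT data v with
      | some d =>
        simp only [rowA, pickLinkB, hr, hv, Option.isSome_some, if_true]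
        rw [rowLoopB_eq_right _ v d data [n] hv]
        exact hbot _
      | none =>
        simp only [rowA, pickLinkB, hr, hv, Option.isSome_none, Bool.false_eq_true, if_false]
        cases hl : getS dat "lef" with
        | some u =>
          cases hu : getT data u with
          | some d2 =>
            simp only [rowALef, pickLefB, hl, hu, Option.isSome_some, if_true]
            rw [rowLoopB_eq_left _ u d2 data [n] hu]
            exact hbot _
          | none => simp [rowALef, pickLefB, hl, hu]
        | none => simp [rowALef, pickLefB, hl]
    | none =>
      simp only [rowA, pickLinkB, hr]
      cases hl : getS dat "lef" with
      | some u =>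
        cases hu : getT data u with
        | some d2 =>
          simp only [rowALef, pickLefB, hl, hu, Option.isSome_some, if_true]
          rw [rowLoopB_eq_left _ u d2 data [n] hu]
          exact hbot _
        | none => simp [rowALef, pickLefB, hl, hu]
      | none => simp [rowALef, pickLefB, hl]

-- ===== VERDICT (by name: the statement is the Claim_ definition above) =====
theorem expand_down_spec : Claim_equal_expand_down := by
  intro n dat data _ _
  unfold Spec_expand_down expand_down expand_down_alt
  rw [downLoopB_eq]
  simp
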